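-- pv_equiv track=rewrite | github.com/yaswanth8008/DSA | Hashing/9. Replicating Substring.py | solve
-- ===== SOURCE A (Python) =====
-- def solve(A, B):
--     d = {}
--     for i in B:
--         d[i] = d.get(i,0) + 1
--     for i in d:
--         if d[i] % A != 0:
--             return -1
--         else:
--             continue
--     return 1
-- ===== SOURCE B (Python) =====
-- def solve(A, B):
--     # Sort the characters, then scan runs of equal characters: each run's
--     # length is that character's total count; fail on the first run whose
--     # length is not divisible by A.
--     def check(s):
--         if not s:
--             return 1
--         c = s[0]
--         j = 1
--         while j < len(s) and s[j] == c:
--             j += 1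
--         if j % A != 0:
--             return -1
--         return check(s[j:])
--     return check(sorted(B))
-- ===== Notes on version B (the rewrite author's own statement) =====
-- stated objective: alternative
-- what changed: Replaces the hash-frequency dictionary and key scan with sort-then-run-length: sort the characters and walk consecutive runs of equal characters, checking each run length for divisibility by A.
import Mathlib
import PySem

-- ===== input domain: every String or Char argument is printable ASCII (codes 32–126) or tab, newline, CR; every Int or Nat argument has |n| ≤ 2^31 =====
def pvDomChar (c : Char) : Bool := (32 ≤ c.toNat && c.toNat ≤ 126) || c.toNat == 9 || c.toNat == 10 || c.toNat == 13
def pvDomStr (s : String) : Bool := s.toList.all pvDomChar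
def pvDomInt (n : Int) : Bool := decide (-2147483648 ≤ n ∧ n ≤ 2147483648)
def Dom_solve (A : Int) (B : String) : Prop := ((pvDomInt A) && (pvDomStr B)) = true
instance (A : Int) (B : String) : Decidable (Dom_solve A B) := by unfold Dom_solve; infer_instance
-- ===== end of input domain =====

-- B differs from A only in traversal: A counts characters in a dict and scans the
-- dict's keys; B sorts the characters and checks the length of each equal-character run.

-- ===== PORT A =====
-- the second loop of A: 'for i in d: if d[i] % A != 0: return -1' then 'return 1'
-- (d[i] with i drawn from d's own keys always hits, so getD 0 is exact here)
def solveLoopKeys (A : Int) (d : PySem.Dict Char Int) : List Char → Int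
  | [] => 1
  | k :: ks => if PySem.Int.mod (d.getD k 0) A ≠ 0 then -1 else solveLoopKeys A d ks

def solve (A : Int) (B : String) : Int :=
  let d := B.toList.foldl (fun d c => d.insert c (d.getD c 0 + 1)) PySem.Dict.empty
  solveLoopKeys A d d.keys

-- ===== PORT B =====
-- Source B's 'check': the inner 'while j < len(s) and s[j] == c: j += 1' counts the
-- leading run of c (= 1 + takeWhile length), 'check(s[j:])' recurses on the rest.
def checkRuns (A : Int) (s : List Char) : Int :=
  match s with
  | [] => 1
  | c :: t =>
    let j : Int := 1 + (t.takeWhile (· == c)).length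
    if PySem.Int.mod j A ≠ 0 then -1
    else checkRuns A (t.dropWhile (· == c))
termination_by s.length
decreasing_by
  simp only [List.length_cons]
  exact Nat.lt_succ_of_le (t.dropWhile_sublist (· == c)).length_le

def solve_alt (A : Int) (B : String) : Int :=
  checkRuns A (PySem.List.sorted B.toList (fun x => x) false)

-- ===== PRECONDITION & SPEC =====
-- Pre_ excludes exactly the inputs where Python raises ZeroDivisionError:
-- A = 0 with a nonempty B makes 'count % A' (A) and 'j % A' (B) both raise.
def Pre_solve (A : Int) (B : String) : Prop := A ≠ 0 ∨ B = ""
instance (A : Int) (B : String) : Decidable (Pre_solve A B) := by unfold Pre_solve; infer_instance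
def pvWitness_solve : Int × String := (2, "abab")
def Spec_solve (A : Int) (B : String) (out : Int) : Prop := out = solve_alt A B
instance (A : Int) (B : String) (out : Int) : Decidable (Spec_solve A B out) := by unfold Spec_solve; infer_instance

-- ===== CLAIM (what is proved, stated in full; the proofs are below) =====
def Claim_equal_solve : Prop := ∀ (A : Int) (B : String), Dom_solve A B → Pre_solve A B → Spec_solve A B (solve A B)

-- ===== LEMMAS AND PROOFS =====

-- A's key-scan loop returns 1 iff every key's stored count is divisible by A
lemma solveLoopKeys_eq (A : Int) (d : PySem.Dict Char Int) (ks : List Char) :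
    solveLoopKeys A d ks =
      if ∀ k ∈ ks, PySem.Int.mod (d.getD k 0) A = 0 then 1 else -1 := by
  induction ks with
  | nil => simp [solveLoopKeys]
  | cons k ks ih =>
    simp only [solveLoopKeys, ih]
    by_cases h : PySem.Int.mod (d.getD k 0) A = 0
    · simp [h]
    · simp [h]

-- on a ≤-sorted list, elements past the leading run of the head differ from the head
lemma dropWhile_head_ne (c : Char) : ∀ (t : List Char), t.Pairwise (· ≤ ·) →
    (∀ x ∈ t, c ≤ x) → ∀ e ∈ t.dropWhile (· == c), e ≠ c := by
  intro t
  induction t with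
  | nil => simp
  | cons a t ih =>
    intro hp hle
    by_cases ha : a = c
    · subst ha
      simp only [List.dropWhile_cons, beq_self_eq_true, if_true]
      exact ih (List.pairwise_cons.mp hp).2 (fun x hx => hle x (List.mem_cons_of_mem a hx))
    · have hdw : (a :: t).dropWhile (· == c) = a :: t := by
        simp [ha]
      rw [hdw]
      intro e he
      rcases List.mem_cons.mp he with rfl | he'
      · exact ha
      · have h1 : c ≤ a := hle a List.mem_cons_self
        have h2 : a ≤ e := (List.pairwise_cons.mp hp).1 e he'
        have : c < a := lt_of_le_of_ne h1 (fun h => ha h.symm)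
        exact fun h => absurd (h ▸ h2) (not_le.mpr this)

-- B's run scan on a sorted list returns 1 iff every character's count is divisible by A
lemma checkRuns_eq (A : Int) : ∀ (s : List Char), s.Pairwise (· ≤ ·) →
    checkRuns A s =
      if ∀ c ∈ s, PySem.Int.mod (s.count c : Int) A = 0 then 1 else -1 := by
  intro s
  induction hn : s.length using Nat.strong_induction_on generalizing s with
  | _ n ih =>
  subst hn
  match s with
  | [] => intro _; simp [checkRuns]
  | c :: t =>
    intro hp
    have hpt : t.Pairwise (· ≤ ·) := (List.pairwise_cons.mp hp).2
    have hct : ∀ x ∈ t, c ≤ x := (List.pairwise_cons.mp hp).1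
    set tw := t.takeWhile (· == c) with htw
    set dw := t.dropWhile (· == c) with hdw
    have hsplit : t = tw ++ dw := (t.takeWhile_append_dropWhile (p := (· == c))).symm
    have htwc : ∀ e ∈ tw, e = c := by
      intro e he
      have he' : e ∈ t.takeWhile (· == c) := htw ▸ he
      have := List.mem_takeWhile_imp (l := t) (p := (· == c)) he'
      exact eq_of_beq this
    have hdwne : ∀ e ∈ dw, e ≠ c := dropWhile_head_ne c t hpt hct
    -- count of c in the whole list is 1 + |tw|
    have hcountc : (c :: t).count c = 1 + tw.length := by
      have h1 : tw.count c = tw.length := List.count_eq_length.mpr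
        (fun b hb => ((htwc b hb).symm ▸ rfl))
      have h2 : dw.count c = 0 := List.count_eq_zero.mpr
        (fun h => (hdwne c h) rfl)
      rw [List.count_cons_self, hsplit, List.count_append, h1, h2]
      omega
    -- counts of dw's elements agree between the whole list and dw
    have hcountd : ∀ x ∈ dw, (c :: t).count x = dw.count x := by
      intro x hx
      have hxc : x ≠ c := hdwne x hx
      have h1 : tw.count x = 0 := List.count_eq_zero.mpr
        (fun h => hxc (htwc x h))
      rw [List.count_cons_of_ne hxc.symm, hsplit, List.count_append, h1]
      omega
    have hdwp : dw.Pairwise (· ≤ ·) :=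
      hpt.sublist (t.dropWhile_sublist (· == c))
    have hlen : dw.length < (c :: t).length :=
      Nat.lt_succ_of_le (t.dropWhile_sublist (· == c)).length_le
    have ihdw := ih dw.length hlen dw rfl hdwp
    -- unfold one step of checkRuns
    rw [checkRuns]
    simp only [← htw, ← hdw]
    by_cases hmod : PySem.Int.mod (1 + (tw.length : Int)) A = 0
    · -- head run passes; result is the recursion on dw
      rw [if_neg (by simpa using hmod), ihdw]
      have hiff : (∀ x ∈ dw, PySem.Int.mod (dw.count x : Int) A = 0) ↔
          (∀ x ∈ c :: t, PySem.Int.mod ((c :: t).count x : Int) A = 0) := by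
        constructor
        · intro h x hx
          rcases List.mem_cons.mp hx with rfl | hxt
          · rw [hcountc]; push_cast; simpa using hmod
          · rcases List.mem_append.mp (hsplit ▸ hxt) with hxtw | hxdw
            · rw [htwc x hxtw, hcountc]; push_cast; simpa using hmod
            · rw [hcountd x hxdw]; exact h x hxdw
        · intro h x hx
          have hxs : x ∈ c :: t := by
            apply List.mem_cons_of_mem
            rw [hsplit]; exact List.mem_append_right _ hx
          rw [← hcountd x hx]; exact h x hxs
      by_cases hall : ∀ x ∈ dw, PySem.Int.mod (dw.count x : Int) A = 0
      · rw [if_pos hall, if_pos (hiff.mp hall)]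
      · rw [if_neg hall, if_neg (fun h => hall (hiff.mpr h))]
    · -- head run fails; c itself witnesses failure on the right
      rw [if_pos (by simpa using hmod)]
      have : ¬ ∀ x ∈ c :: t, PySem.Int.mod ((c :: t).count x : Int) A = 0 := by
        intro h
        have := h c List.mem_cons_self
        rw [hcountc] at this
        push_cast at this
        exact hmod this
      rw [if_neg this]

-- ===== VERDICT (by name: the statement is the Claim_ definition above) =====
theorem solve_spec : Claim_equal_solve := by
  intro A B _ _
  unfold Spec_solve solve solve_alt
  set l := B.toList
  rw [PySem.Dict.foldl_insert_getD_add_one_eq_counter, solveLoopKeys_eq,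
      checkRuns_eq A _ (PySem.List.sorted_pairwise l (fun x => x) )]
  have hperm := PySem.List.sorted_perm l (fun x => x) false
  have hiff : (∀ k ∈ (PySem.Dict.counter l).keys,
      PySem.Int.mod ((PySem.Dict.counter l).getD k 0) A = 0) ↔
      (∀ c ∈ PySem.List.sorted l (fun x => x) false,
        PySem.Int.mod (((PySem.List.sorted l (fun x => x) false).count c : Int)) A = 0) := by
    rw [PySem.Dict.keys_counter]
    constructor
    · intro h c hc
      have hcl : c ∈ l := (PySem.List.mem_sorted _ _ _ _).mp hc
      have := h c ((PySem.Set.mem_ofList _ _).mpr hcl)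
      rwa [PySem.Dict.getD_counter, ← hperm.count_eq] at this
    · intro h k hk
      have hkl : k ∈ l := (PySem.Set.mem_ofList _ _).mp hk
      have := h k ((PySem.List.mem_sorted _ _ _ _).mpr hkl)
      rwa [PySem.Dict.getD_counter, ← hperm.count_eq]
  by_cases hall : ∀ k ∈ (PySem.Dict.counter l).keys,
      PySem.Int.mod ((PySem.Dict.counter l).getD k 0) A = 0
  · rw [if_pos hall, if_pos (hiff.mp hall)]
  · rw [if_neg hall, if_neg (fun h => hall (hiff.mpr h))]
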